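-- pv_equiv track=rewrite | github.com/DMTF/Redfish-Tools | doc-generator/doc_formatter/doc_formatter.py | truncate_version
-- ===== SOURCE A (Python) =====
-- def truncate_version(version_string, num_parts, with_prejudice=False):
--     """Truncate the version string to at least the specified number of parts.
--
--     Maintains additional part(s) if non-zero, unless with_prejudice is True
--     """
--
--     parts = version_string.split('.')
--     keep = []
--     for part in parts:
--         if len(keep) < num_parts:
--             keep.append(part)
--         elif part != '0' and not with_prejudice:
--             keep.append(part)
--         else:
--             break
--
--     return '.'.join(keep)
-- ===== SOURCE B (Python) =====
-- def truncate_version(version_string, num_parts, with_prejudice=False):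
--     """Truncate the version string to at least num_parts parts, keeping
--     extra non-zero parts unless with_prejudice: computed by slicing at a
--     cut index instead of appending part by part."""
--     parts = version_string.split('.')
--     n = min(max(num_parts, 0), len(parts))
--     tail = parts[n:]
--     extra = 0 if with_prejudice else (tail.index('0') if '0' in tail else len(tail))
--     return '.'.join(parts[:n + extra])
-- ===== Notes on version B (the rewrite author's own statement) =====
-- stated objective: simpler
-- what changed: Replaces the part-by-part counting loop with slicing: the first num_parts parts are a fixed prefix, the extra count is found with tail.index('0') (or the whole tail), and one join of parts[:n+extra] produces the result.
import Mathlib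
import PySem

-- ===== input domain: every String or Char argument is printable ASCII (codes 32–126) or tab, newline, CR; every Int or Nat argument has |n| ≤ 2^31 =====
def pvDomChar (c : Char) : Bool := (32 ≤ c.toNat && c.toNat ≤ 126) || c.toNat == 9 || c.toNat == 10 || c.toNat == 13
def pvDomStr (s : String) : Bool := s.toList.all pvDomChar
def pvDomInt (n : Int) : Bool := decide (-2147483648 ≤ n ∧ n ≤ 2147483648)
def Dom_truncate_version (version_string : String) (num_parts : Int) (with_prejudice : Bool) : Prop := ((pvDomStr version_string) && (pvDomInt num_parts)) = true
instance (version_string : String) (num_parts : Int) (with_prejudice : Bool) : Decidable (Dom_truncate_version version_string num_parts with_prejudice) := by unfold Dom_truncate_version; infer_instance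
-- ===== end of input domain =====

-- B replaces A's element-by-element counting loop by a cut index computed with slicing and list.index ('simpler'); same return value everywhere.

-- ===== PORT A =====
-- A's for-loop over parts with the growing 'keep' accumulator and a break
def truncateLoopA (num_parts : Int) (with_prejudice : Bool) : List String → List String → List String
  | keep, [] => keep
  | keep, part :: rest =>
    if (keep.length : Int) < num_parts then
      truncateLoopA num_parts with_prejudice (keep ++ [part]) rest
    else if part ≠ "0" ∧ with_prejudice = false then
      truncateLoopA num_parts with_prejudice (keep ++ [part]) rest
    else
      keep

def truncate_version (version_string : String) (num_parts : Int) (with_prejudice : Bool) : String :=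
  let parts := (PySem.Str.split? version_string ".").getD []
  let keep := truncateLoopA num_parts with_prejudice [] parts
  PySem.Str.join "." keep

-- ===== PORT B =====
def truncate_version_alt (version_string : String) (num_parts : Int) (with_prejudice : Bool) : String :=
  let parts := (PySem.Str.split? version_string ".").getD []
  let n : Int := min (max num_parts 0) (parts.length : Int)
  let tail := PySem.List.slice parts (some n) none
  let extra : Int :=
    if with_prejudice then 0
    else match PySem.List.index? tail "0" with
      | some i => (i : Int)
      | none => (tail.length : Int)
  PySem.Str.join "." (PySem.List.slice parts none (some (n + extra)))

-- ===== PRECONDITION & SPEC =====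
def Spec_truncate_version (version_string : String) (num_parts : Int) (with_prejudice : Bool) (out : String) : Prop := out = truncate_version_alt version_string num_parts with_prejudice
instance (version_string : String) (num_parts : Int) (with_prejudice : Bool) (out : String) : Decidable (Spec_truncate_version version_string num_parts with_prejudice out) := by unfold Spec_truncate_version; infer_instance

-- ===== CLAIM (what is proved, stated in full; the proofs are below) =====
def Claim_equal_truncate_version : Prop := ∀ (version_string : String) (num_parts : Int) (with_prejudice : Bool), Dom_truncate_version version_string num_parts with_prejudice → Spec_truncate_version version_string num_parts with_prejudice (truncate_version version_string num_parts with_prejudice)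

-- ===== LEMMAS AND PROOFS =====

-- canonical value both sides reach: first m parts, then (unless with_prejudice) the non-'0' run
def truncCanon (l : List String) (m : Nat) (wp : Bool) : List String :=
  l.take m ++ (if wp then [] else (l.drop m).takeWhile (· ≠ "0"))

lemma loopA_keep (wp : Bool) :
    ∀ (l : List String) (np : Int) (keep : List String),
      truncateLoopA np wp keep l = keep ++ truncCanon l (max (np - keep.length) 0).toNat wp := by
  intro l
  induction l with
  | nil => intro np keep; simp [truncateLoopA, truncCanon]
  | cons p rest ih =>
    intro np keep
    by_cases h : (keep.length : Int) < np
    · have hM : (max (np - keep.length) 0).toNat = (max (np - (keep.length + 1)) 0).toNat + 1 := by omega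
      rw [truncateLoopA, if_pos h, ih]
      simp only [List.length_append, List.length_cons, List.length_nil, Nat.cast_add, Nat.cast_one]
      rw [hM]
      simp [truncCanon, List.take_succ_cons]
    · have hM : (max (np - keep.length) 0).toNat = 0 := by omega
      rw [truncateLoopA, if_neg h, hM]
      by_cases h2 : p ≠ "0" ∧ wp = false
      · rw [if_pos h2, ih]
        have hM2 : (max (np - ((keep ++ [p]).length : Int)) 0).toNat = 0 := by
          simp only [List.length_append, List.length_cons, List.length_nil]; omega
        rw [hM2]
        simp [truncCanon, h2.2, h2.1]
      · rw [if_neg h2]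
        rcases Bool.eq_false_or_eq_true wp with hw | hw
        · simp [truncCanon, hw]
        · have hp : p = "0" := by
            by_contra hp; exact h2 ⟨hp, hw⟩
          simp [truncCanon, hw, hp]

lemma index?_take_eq_takeWhile (l : List String) :
    (match PySem.List.index? l "0" with
      | some i => l.take i
      | none => l) = l.takeWhile (· ≠ "0") := by
  induction l with
  | nil => simp [PySem.List.index?]
  | cons p rest ih =>
    by_cases hp : p = "0"
    · subst hp
      rw [PySem.List.index?_cons_self]
      simp
    · rw [PySem.List.index?_cons_of_ne rest hp]
      rw [PySem.List.index?_eq_idxOf?] at ih ⊢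
      cases hix : List.idxOf? "0" rest with
      | none => simp [hix] at ih ⊢; simp [hp, ← ih]
      | some i =>
        simp [hix] at ih ⊢
        rw [List.takeWhile_cons]
        simp [hp, ih]

lemma take_minl {α : Type} (l : List α) (M : Nat) : l.take M = l.take (min M l.length) := by simp

lemma drop_minl {α : Type} (l : List α) (M : Nat) : l.drop M = l.drop (min M l.length) := by
  rcases le_total M l.length with h | h
  · simp [Nat.min_eq_left h]
  · simp [Nat.min_eq_right h, List.drop_of_length_le h]

lemma lists_eq (np : Int) (wp : Bool) (l : List String) :
    truncateLoopA np wp [] l =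
      PySem.List.slice l none (some (min (max np 0) (l.length : Int) +
        (if wp then 0 else
          match PySem.List.index? (PySem.List.slice l (some (min (max np 0) (l.length : Int))) none) "0" with
          | some i => (i : Int)
          | none => ((PySem.List.slice l (some (min (max np 0) (l.length : Int))) none).length : Int)))) := by
  have hn0 : (0:Int) ≤ min (max np 0) (l.length : Int) :=
    le_min (le_max_right _ _) (Int.natCast_nonneg _)
  have hnN : (min (max np 0) (l.length : Int)).toNat = min (max np 0).toNat l.length := by omega
  rw [PySem.List.slice_from _ hn0, hnN]
  rw [loopA_keep, List.nil_append]
  have hcanon : truncCanon l (max (np - ↑(List.length ([] : List String))) 0).toNat wp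
      = truncCanon l (min (max np 0).toNat l.length) wp := by
    have hM : (max (np - ↑(List.length ([] : List String))) 0).toNat = (max np 0).toNat := by
      simp
    rw [hM]
    unfold truncCanon
    rw [take_minl l (max np 0).toNat, drop_minl l (max np 0).toNat]
  rw [hcanon]
  set nN := min (max np 0).toNat l.length with hdefn
  have hextra0 : (0:Int) ≤ (if wp then 0 else
      match PySem.List.index? (l.drop nN) "0" with
      | some i => (i : Int)
      | none => ((l.drop nN).length : Int)) := by
    split_ifs
    · exact le_refl 0
    · cases PySem.List.index? (l.drop nN) "0" <;> simp
  rw [PySem.List.slice_to _ (by exact add_nonneg hn0 hextra0)]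
  have htoNat : (min (max np 0) (l.length : Int) +
      (if wp then 0 else
        match PySem.List.index? (l.drop nN) "0" with
        | some i => (i : Int)
        | none => ((l.drop nN).length : Int))).toNat
      = nN + (if wp then 0 else
        match PySem.List.index? (l.drop nN) "0" with
        | some i => (i : Int)
        | none => ((l.drop nN).length : Int)).toNat := by omega
  rw [htoNat, List.take_add]
  unfold truncCanon
  congr 1
  rcases Bool.eq_false_or_eq_true wp with hw | hw <;> rw [hw]
  · simp
  · have this := index?_take_eq_takeWhile (l.drop nN)
    cases hix : PySem.List.index? (l.drop nN) "0" with
    | none =>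
      rw [hix] at this
      simp only [Bool.false_eq_true, if_false, Int.toNat_natCast]
      rw [← this]; simp
    | some i =>
      rw [hix] at this
      simp only [Bool.false_eq_true, if_false, Int.toNat_natCast]
      exact this.symm

-- ===== VERDICT (by name: the statement is the Claim_ definition above) =====
theorem truncate_version_spec : Claim_equal_truncate_version := by
  intro version_string np wp _
  unfold Spec_truncate_version truncate_version truncate_version_alt
  exact congrArg (PySem.Str.join ".") (lists_eq np wp _)
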